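-- pv_equiv track=rewrite | github.com/supportersimulator/contextdna-ide | scripts/discord-split.py | _last_unmatched_bracket
-- ===== SOURCE A (Python) =====
-- def _last_unmatched_bracket(text: str) -> int:
--     """Return index of a trailing ``[`` that has no matching ``)``.
--
--     We walk backwards looking for the last ``[`` whose matching ``]``
--     and ``(...)`` close AFTER the supplied text ends. If such a bracket
--     exists, callers should split BEFORE it so the link stays whole.
--     Returns -1 if no unmatched bracket found.
--     """
--     # Fast exit: no `[` at all.
--     if "[" not in text:
--         return -1
--     depth_brack = 0
--     depth_paren = 0
--     # Scan right-to-left tracking balanced [...](...)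
--     for i in range(len(text) - 1, -1, -1):
--         ch = text[i]
--         if ch == ")":
--             depth_paren += 1
--         elif ch == "(":
--             depth_paren -= 1
--         elif ch == "]":
--             depth_brack += 1
--         elif ch == "[":
--             if depth_brack <= 0:
--                 # Unmatched — check if this looks like start of a link.
--                 # Heuristic: an unmatched [ means link is still opening.
--                 return i
--             depth_brack -= 1
--     return -1
-- ===== SOURCE B (Python) =====
-- def _last_unmatched_bracket(text: str) -> int:
--     """Single forward pass with a stack of '[' indices; pop on ']' when
--     possible; the top of the final stack is the rightmost unmatched '['."""
--     stack = []
--     for i, ch in enumerate(text):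
--         if ch == "[":
--             stack.append(i)
--         elif ch == "]" and stack:
--             stack.pop()
--     return stack[-1] if stack else -1
-- ===== Notes on version B (the rewrite author's own statement) =====
-- stated objective: idiomatic
-- what changed: Replaces A's backward two-counter scan (with a dead paren counter) by the standard forward pass keeping a stack of '[' indices, popping on ']'; the stack top is the rightmost unmatched '['.
import Mathlib
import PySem

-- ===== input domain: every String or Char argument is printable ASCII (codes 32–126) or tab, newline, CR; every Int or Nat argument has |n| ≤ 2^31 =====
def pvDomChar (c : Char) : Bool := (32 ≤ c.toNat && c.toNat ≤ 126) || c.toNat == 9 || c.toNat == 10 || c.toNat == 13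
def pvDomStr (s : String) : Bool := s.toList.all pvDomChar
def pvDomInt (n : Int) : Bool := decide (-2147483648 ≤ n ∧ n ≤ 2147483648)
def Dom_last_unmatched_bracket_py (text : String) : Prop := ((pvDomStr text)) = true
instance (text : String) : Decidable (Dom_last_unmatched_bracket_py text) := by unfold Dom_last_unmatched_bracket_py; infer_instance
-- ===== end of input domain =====

-- B replaces A's backward two-counter scan by the idiomatic forward pass with a stack
-- of '[' indices (same O(n) cost, no speed claim).

-- ===== PORT A =====
-- A's backward loop `for i in range(len(text)-1, -1, -1)`: fuel k+1 means the current
-- index is k; every index accessed is in range, so `cs.getD k ' '` is exact for text[i].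
def aLoop (cs : List Char) : Nat → Int → Int → Int
  | 0, _, _ => -1
  | k + 1, depth_brack, depth_paren =>
    let ch := cs.getD k ' '
    if ch = ')' then aLoop cs k depth_brack (depth_paren + 1)
    else if ch = '(' then aLoop cs k depth_brack (depth_paren - 1)
    else if ch = ']' then aLoop cs k (depth_brack + 1) depth_paren
    else if ch = '[' then
      if depth_brack ≤ 0 then (k : Int)
      else aLoop cs k (depth_brack - 1) depth_paren
    else aLoop cs k depth_brack depth_paren

def last_unmatched_bracket_py (text : String) : Int :=
  -- Fast exit: `"[" not in text`
  if PySem.Str.isIn "[" text = false then -1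
  else aLoop text.toList text.toList.length 0 0

-- ===== PORT B =====
-- one step of B's loop body; the stack keeps its top at the head (Python appends at the
-- end and reads stack[-1]/pops the end — same stack, same values).
def bStep (st : List Int) (ic : Int × Char) : List Int :=
  if ic.2 = '[' then ic.1 :: st
  else if ic.2 = ']' ∧ st ≠ [] then st.tail
  else st

def last_unmatched_bracket_py_alt (text : String) : Int :=
  match (PySem.List.enumerate text.toList).foldl bStep [] with
  | [] => -1            -- `return -1 if not stack`
  | i :: _ => i         -- `stack[-1]`

-- ===== PRECONDITION & SPEC =====
def Spec_last_unmatched_bracket_py (text : String) (out : Int) : Prop := out = last_unmatched_bracket_py_alt text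
instance (text : String) (out : Int) : Decidable (Spec_last_unmatched_bracket_py text out) := by unfold Spec_last_unmatched_bracket_py; infer_instance

-- ===== CLAIM (what is proved, stated in full; the proofs are below) =====
def Claim_equal_last_unmatched_bracket_py : Prop := ∀ (text : String), Dom_last_unmatched_bracket_py text → Spec_last_unmatched_bracket_py text (last_unmatched_bracket_py text)

-- ===== LEMMAS AND PROOFS =====

-- the stack after B's pass over the first k characters
def prefStack (cs : List Char) (k : Nat) : List Int :=
  (PySem.List.enumerate (cs.take k)).foldl bStep []

theorem prefStack_succ (cs : List Char) (k : Nat) (hk : k < cs.length) :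
    prefStack cs (k + 1) = bStep (prefStack cs k) ((k : Int), cs[k]) := by
  unfold prefStack
  rw [List.take_add_one, List.getElem?_eq_getElem hk]
  rw [Option.toList_some, PySem.List.enumerate_append]
  simp [List.length_take, Nat.min_eq_left (Nat.le_of_lt hk), PySem.List.enumerate]

-- KEY INVARIANT: A's backward scan over the suffix from index k, carrying counter
-- depth_brack = d, returns the d-th element (top = 0) of B's stack for the prefix of
-- length k.  A's depth_brack is exactly "how many of the top stack entries were
-- cancelled by ']'s already seen to the right".
theorem aLoop_eq_prefStack (cs : List Char) (k : Nat) (hk : k ≤ cs.length)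
    (d : Nat) (dp : Int) :
    aLoop cs k (d : Int) dp = (prefStack cs k).getD d (-1) := by
  induction k generalizing d dp with
  | zero => simp [aLoop, prefStack]
  | succ k ih =>
    have hk' : k < cs.length := hk
    have hk'' : k ≤ cs.length := Nat.le_of_lt hk'
    have hget' : cs[k]?.getD ' ' = cs[k] := by rw [List.getElem?_eq_getElem hk']; rfl
    rw [prefStack_succ cs k hk']
    by_cases h1 : cs[k] = ')'
    · simp [aLoop, hget', h1, bStep, ih hk'' d]
    · by_cases h2 : cs[k] = '('
      · simp [aLoop, hget', h2, bStep, ih hk'' d]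
      · by_cases h3 : cs[k] = ']'
        · -- A: depth_brack + 1;  B: pop (tail) — getD d of the tail is getD (d+1)
          have ih' := ih hk'' (d + 1) dp
          push_cast at ih'
          cases hst : prefStack cs k with
          | nil => rw [hst] at ih'; simp [aLoop, hget', h3, bStep, ih']
          | cons x t => rw [hst] at ih'; simp [aLoop, hget', h3, bStep, ih']
        · by_cases h4 : cs[k] = '['
          · cases d with
            | zero => simp [aLoop, hget', h4, bStep]
            | succ d' =>
              have ih' := ih hk'' d' dp
              have hpos : ¬(((d' : Int) + 1) ≤ 0) := by omega
              simp [aLoop, hget', h4, hpos, add_sub_cancel_right, ih', bStep]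
          · simp [aLoop, hget', h1, h2, h3, h4, bStep, ih hk'' d]

-- if the text has no '[', B never pushes, so its stack stays empty
theorem foldl_bStep_no_open (l : List (Int × Char)) (hl : ∀ p ∈ l, p.2 ≠ '[') :
    l.foldl bStep [] = [] := by
  induction l with
  | nil => rfl
  | cons p l ih =>
    have hp := hl p (List.mem_cons_self)
    have hstep : bStep [] p = [] := by simp [bStep, hp]
    rw [List.foldl_cons, hstep]
    exact ih (fun q hq => hl q (List.mem_cons_of_mem _ hq))

theorem alt_eq_getD (text : String) :
    last_unmatched_bracket_py_alt text
      = (prefStack text.toList text.toList.length).getD 0 (-1) := by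
  unfold last_unmatched_bracket_py_alt prefStack
  rw [List.take_length]
  cases (PySem.List.enumerate text.toList).foldl bStep [] with
  | nil => rfl
  | cons x t => rfl

-- ===== VERDICT (by name: the statement is the Claim_ definition above) =====
theorem last_unmatched_bracket_py_spec : Claim_equal_last_unmatched_bracket_py := by
  intro text _
  unfold Spec_last_unmatched_bracket_py last_unmatched_bracket_py
  by_cases hin : PySem.Str.isIn "[" text = false
  · -- no '[' in text: A returns -1 via the fast exit, B's stack stays empty
    rw [if_pos hin, alt_eq_getD]
    unfold prefStack
    rw [List.take_length, foldl_bStep_no_open]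
    · rfl
    · intro p hp hpc
      have hmem : p.2 ∈ text.toList := by
        have h2 : p.2 ∈ (PySem.List.enumerate text.toList).map (·.2) :=
          List.mem_map_of_mem hp
        rwa [PySem.List.map_snd_enumerate] at h2
      have hb : ('[' : Char) ∈ text.toList := hpc ▸ hmem
      have hinf : ("[" : String).toList <:+: text.toList :=
        (List.singleton_infix_iff _ _).mpr hb
      rw [(PySem.Str.isIn_iff_infix _ _).mpr hinf] at hin
      exact absurd hin (by simp)
  · rw [if_neg hin, alt_eq_getD]
    exact aLoop_eq_prefStack text.toList text.toList.length le_rfl 0 0
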